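-- pv_equiv track=rewrite | github.com/Akitektuo/University | 1st year/PF/Lab/Assignment1/FirstSet2.py | determine_prime_numbers_for_sum
-- ===== SOURCE A (Python) =====
-- def get_all_prime_numbers_until(limit, inclusive = True):
--     prime_numbers = []
--
--     if inclusive:
--         limit += 1
--     prime = [True for i in range(limit)]
--
--     for potential_prime_number in range(2, limit):
--         if prime[potential_prime_number]:
--             prime_numbers.append(potential_prime_number)
--             for i in range(potential_prime_number * potential_prime_number, limit, potential_prime_number):
--                 prime[i] = False
--
--     return prime_numbers
--
-- def determine_prime_numbers_for_sum(desired_sum):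
--     prime_numbers = get_all_prime_numbers_until(desired_sum)
--
--     for i in range(len(prime_numbers)):
--         if prime_numbers[i] > desired_sum // 2:
--             break
--         wanted_number = desired_sum - prime_numbers[i]
--         if wanted_number in prime_numbers:
--             return (prime_numbers[i], wanted_number)
--
--     return (0, 0)
-- ===== SOURCE B (Python) =====
-- def determine_prime_numbers_for_sum(desired_sum):
--     def is_prime(k):
--         if k < 2:
--             return False
--         d = 2
--         while d * d <= k:
--             if k % d == 0:
--                 return False
--             d += 1
--         return True
--
--     for i in range(2, desired_sum // 2 + 1):
--         if is_prime(i) and is_prime(desired_sum - i):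
--             return (i, desired_sum - i)
--     return (0, 0)
-- ===== Notes on version B (the rewrite author's own statement) =====
-- stated objective: faster
-- what changed: Replaced the precomputed Eratosthenes sieve table plus per-candidate linear list-membership scans with a single loop over the candidates up to half the sum, using trial division up to the square root for both halves of the sum.
import Mathlib
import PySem

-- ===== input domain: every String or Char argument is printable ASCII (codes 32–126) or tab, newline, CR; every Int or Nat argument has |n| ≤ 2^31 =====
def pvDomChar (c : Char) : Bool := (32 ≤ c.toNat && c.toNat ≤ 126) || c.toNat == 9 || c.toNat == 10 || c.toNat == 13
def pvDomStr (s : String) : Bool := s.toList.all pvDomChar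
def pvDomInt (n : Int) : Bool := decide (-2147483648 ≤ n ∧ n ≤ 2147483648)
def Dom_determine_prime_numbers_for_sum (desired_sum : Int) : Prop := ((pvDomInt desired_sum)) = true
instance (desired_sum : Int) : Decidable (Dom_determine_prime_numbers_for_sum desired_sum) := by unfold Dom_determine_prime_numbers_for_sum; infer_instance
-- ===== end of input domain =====

-- B replaces A's precomputed sieve table + per-candidate list-membership scans with per-candidate trial division; a timing run measured B faster.

-- ===== PORT A =====
-- Python's mutable list `prime` is carried as an Array; every index used is nonnegative and
-- in range (p ≥ 2, p*p ≤ i < limit = len(prime)), so `.toNat` / setIfInBounds are exact here.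
-- inner loop `for i in range(p*p, limit, p): prime[i] = False`
def pvMark (limit p : Int) (board : Array Bool) : Array Bool :=
  (PySem.List.pyRange (p * p) limit p).foldl (fun b i => b.setIfInBounds i.toNat false) board

-- one iteration of the outer sieve loop; state = (prime_numbers, prime)
def pvSieveStep (limit : Int) (st : Array Int × Array Bool) (p : Int) : Array Int × Array Bool :=
  if st.2.getD p.toNat false then (st.1.push p, pvMark limit p st.2) else st

def get_all_prime_numbers_until (limit0 : Int) (inclusive : Bool) : List Int :=
  let limit := if inclusive then limit0 + 1 else limit0
  -- [True for i in range(limit)]  (empty for limit ≤ 0, as in Python)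
  let board := Array.replicate limit.toNat true
  ((PySem.List.pyRange 2 limit).foldl (pvSieveStep limit) (#[], board)).1.toList

-- `for i in range(len(prime_numbers)): …` with break / early return, walked as the list itself
def pvScanA (s : Int) (primes : List Int) : List Int → List Int
  | [] => [0, 0]
  | p :: rest =>
    if p > PySem.Int.floordiv s 2 then [0, 0]
    else if primes.contains (s - p) then [p, s - p]
    else pvScanA s primes rest

def determine_prime_numbers_for_sum (desired_sum : Int) : List Int :=
  let primes := get_all_prime_numbers_until desired_sum true
  pvScanA desired_sum primes primes

-- ===== PORT B =====
-- `while d * d <= k: …` of Source B's is_prime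
def pvTrialAux (k d : Int) : Bool :=
  if _h : d * d ≤ k then
    if PySem.Int.mod k d == 0 then false else pvTrialAux k (d + 1)
  else true
termination_by (k + 1 - d).toNat
decreasing_by
  have h2 : 0 ≤ (d - 1) * (d - 1) := mul_self_nonneg _
  have h3 : 0 ≤ d * d := mul_self_nonneg _
  have : 2 * d ≤ k + 1 := by nlinarith
  omega

def pv_is_prime (k : Int) : Bool := if k < 2 then false else pvTrialAux k 2

def pvScanB (s : Int) : List Int → List Int
  | [] => [0, 0]
  | i :: rest =>
    if pv_is_prime i && pv_is_prime (s - i) then [i, s - i] else pvScanB s rest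

def determine_prime_numbers_for_sum_alt (desired_sum : Int) : List Int :=
  pvScanB desired_sum (PySem.List.pyRange 2 (PySem.Int.floordiv desired_sum 2 + 1))

-- ===== PRECONDITION & SPEC =====
def Spec_determine_prime_numbers_for_sum (desired_sum : Int) (out : List Int) : Prop := out = determine_prime_numbers_for_sum_alt desired_sum
instance (desired_sum : Int) (out : List Int) : Decidable (Spec_determine_prime_numbers_for_sum desired_sum out) := by unfold Spec_determine_prime_numbers_for_sum; infer_instance

-- ===== CLAIM (what is proved, stated in full; the proofs are below) =====
def Claim_equal_determine_prime_numbers_for_sum : Prop := ∀ (desired_sum : Int), Dom_determine_prime_numbers_for_sum desired_sum → Spec_determine_prime_numbers_for_sum desired_sum (determine_prime_numbers_for_sum desired_sum)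

-- ===== LEMMAS AND PROOFS =====

-- trial division: pvTrialAux k d is "no divisor e of k with d ≤ e and e*e ≤ k"
theorem pvTrialAux_iff (k : Int) : ∀ (d : Int), 2 ≤ d →
    (pvTrialAux k d = true ↔ ∀ e : Int, d ≤ e → e * e ≤ k → ¬ e ∣ k) := by
  intro d
  induction d using pvTrialAux.induct k with
  | case1 d hle hmod =>
    intro hd
    rw [pvTrialAux]
    simp only [hle, if_pos, hmod, if_true]
    constructor
    · intro h; cases h
    · intro h
      exact absurd ((PySem.Int.mod_eq_zero_iff_dvd k d).mp (by simpa using hmod))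
        (h d le_rfl hle)
  | case2 d hle hmod ih =>
    intro hd
    rw [pvTrialAux]
    have hnd : ¬ d ∣ k := fun hdvd => hmod (by simp [(PySem.Int.mod_eq_zero_iff_dvd k d).mpr hdvd])
    simp only [hle, hmod, if_true, dite_true, decide_eq_true_eq, if_false, Bool.not_true,
      Bool.not_false, Bool.true_and, eq_self_iff_true, not_false_iff, decide_false, decide_true,
      Bool.false_eq_true, if_false]
    rw [ih (by omega)]
    constructor
    · intro h e he hek
      rcases eq_or_lt_of_le he with rfl | hlt
      · exact hnd
      · exact h e (by omega) hek
    · intro h e he hek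
      exact h e (by omega) hek
  | case3 d hle =>
    intro hd
    rw [pvTrialAux]
    simp only [hle, if_neg, if_false]
    constructor
    · intro _ e he hek
      exfalso
      have : d * d ≤ e * e := mul_le_mul he he (by omega) (by omega)
      omega
    · intro _; rfl

theorem pv_is_prime_iff (k : Int) : pv_is_prime k = true ↔ 2 ≤ k ∧ k.toNat.Prime := by
  unfold pv_is_prime
  by_cases hk : k < 2
  · simp only [if_pos hk, Bool.false_eq_true, false_iff]
    rintro ⟨h2, -⟩; omega
  · push_neg at hk
    simp only [if_neg (not_lt.mpr hk)]
    rw [pvTrialAux_iff k 2 le_rfl]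
    have hkn : k = (k.toNat : Int) := (Int.toNat_of_nonneg (by omega)).symm
    constructor
    · intro h
      refine ⟨hk, Nat.prime_def_le_sqrt.mpr ⟨by omega, fun m hm hms hdvd => ?_⟩⟩
      have hmm : m * m ≤ k.toNat := Nat.le_sqrt.mp hms
      refine h (m : Int) (by exact_mod_cast hm) (by rw [hkn]; exact_mod_cast hmm) ?_
      rw [hkn]; exact_mod_cast hdvd
    · rintro ⟨-, hp⟩ e he hek hdvd
      have he0 : 0 ≤ e := by omega
      have heN : e = (e.toNat : Int) := (Int.toNat_of_nonneg he0).symm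
      have h1 : 2 ≤ e.toNat := by omega
      have h2 : e.toNat * e.toNat ≤ k.toNat := by
        have : ((e.toNat * e.toNat : ℕ) : Int) ≤ ((k.toNat : ℕ) : Int) := by
          push_cast; rw [← heN, ← hkn]; exact hek
        exact_mod_cast this
      have h3 : e.toNat ∣ k.toNat := by
        have : ((e.toNat : ℕ) : Int) ∣ ((k.toNat : ℕ) : Int) := by rw [← heN, ← hkn]; exact hdvd
        exact_mod_cast this
      exact (Nat.prime_def_le_sqrt.mp hp).2 e.toNat h1 (Nat.le_sqrt.mpr h2) h3

-- "i was crossed out while the outer loop ran over candidates < c"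
def pvMarked (c : Int) (i : ℕ) : Prop :=
  ∃ q : ℕ, q.Prime ∧ (q : Int) < c ∧ q ∣ i ∧ q * q ≤ i

-- sieve loop invariant before processing candidate c
def pvInv (limit c : Int) (st : Array Int × Array Bool) : Prop :=
  st.2.size = limit.toNat ∧
  (∀ i : ℕ, i < limit.toNat → (st.2.getD i false = true ↔ ¬ pvMarked c i)) ∧
  st.1.toList = (PySem.List.pyRange 2 c).filter (fun p => pv_is_prime p)

theorem pvFoldSetD_size (idxs : List Int) (board : Array Bool) :
    (idxs.foldl (fun b i => b.setIfInBounds i.toNat false) board).size = board.size := by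
  induction idxs generalizing board with
  | nil => rfl
  | cons i rest ih => simp [List.foldl_cons, ih, Array.size_setIfInBounds]

theorem pvFoldSetD_getD (idxs : List Int) (board : Array Bool) (j : ℕ)
    (hnn : ∀ i ∈ idxs, 0 ≤ i) :
    (idxs.foldl (fun b i => b.setIfInBounds i.toNat false) board).getD j false =
      if (j : Int) ∈ idxs then false else board.getD j false := by
  induction idxs generalizing board with
  | nil => simp
  | cons i rest ih =>
    have hi0 : 0 ≤ i := hnn i (by simp)
    simp only [List.foldl_cons]
    rw [ih _ (fun x hx => hnn x (by simp [hx]))]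
    by_cases hjr : (j : Int) ∈ rest
    · simp [hjr]
    · by_cases hij : i = (j : Int)
      · have : i.toNat = j := by omega
        subst this
        rw [if_neg hjr, if_pos (by rw [← hij]; exact List.mem_cons_self)]
        rw [Array.getD_eq_getD_getElem?, Array.getElem?_setIfInBounds, if_pos rfl]
        by_cases hlt : i.toNat < board.size <;> simp [hlt]
      · have hne : i.toNat ≠ j := by omega
        rw [if_neg hjr, if_neg (fun h => by rcases List.mem_cons.mp h with h | h; exact hij h.symm; exact hjr h)]
        rw [Array.getD_eq_getD_getElem?, Array.getElem?_setIfInBounds, if_neg hne,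
          ← Array.getD_eq_getD_getElem?]

theorem pvMark_getD (limit p : Int) (board : Array Bool) (j : ℕ)
    (hp : 2 ≤ p) (hlen : board.size = limit.toNat) (hj : j < limit.toNat) :
    (pvMark limit p board).getD j false =
      if (p ∣ (j : Int) ∧ p * p ≤ (j : Int)) then false else board.getD j false := by
  unfold pvMark
  have hpp : p ∣ p * p := dvd_mul_left p p
  have hp0 : (0:Int) < p := by omega
  rw [pvFoldSetD_getD _ _ _ (fun i hi => by
    have hm := (PySem.List.mem_pyRange_iff_of_pos hp0 i).mp hi
    nlinarith [hm.1])]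
  have hjl : (j : Int) < limit := by omega
  by_cases hc : p ∣ (j : Int) ∧ p * p ≤ (j : Int)
  · rw [if_pos hc, if_pos ((PySem.List.mem_pyRange_iff_of_pos hp0 _).mpr
      ⟨hc.2, hjl, dvd_sub hc.1 hpp⟩)]
  · rw [if_neg hc, if_neg (fun hm => hc ?_)]
    have hm' := (PySem.List.mem_pyRange_iff_of_pos hp0 _).mp hm
    exact ⟨by simpa using dvd_add hm'.2.2 hpp, hm'.1⟩

theorem pvNotMarked_iff_prime (c : Int) (hc : 2 ≤ c) :
    (¬ pvMarked c c.toNat) ↔ c.toNat.Prime := by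
  constructor
  · intro h
    by_contra hnp
    apply h
    have hq := Nat.minFac_prime (show c.toNat ≠ 1 by omega)
    have hsq : c.toNat.minFac ^ 2 ≤ c.toNat := Nat.minFac_sq_le_self (by omega) hnp
    have h2 : 2 ≤ c.toNat.minFac := hq.two_le
    have hlt : c.toNat.minFac < c.toNat := by nlinarith
    exact ⟨c.toNat.minFac, hq, by omega, Nat.minFac_dvd _, by nlinarith⟩
  · rintro hp ⟨q, hqp, hqc, hqdvd, hqq⟩
    rcases hp.eq_one_or_self_of_dvd q hqdvd with h1 | h1
    · have := hqp.two_le; omega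
    · omega

theorem pvStep_inv (limit c : Int) (st : Array Int × Array Bool)
    (hc : 2 ≤ c) (hcl : c < limit) (h : pvInv limit c st) :
    pvInv limit (c + 1) (pvSieveStep limit st c) := by
  obtain ⟨hlen, hboard, hacc⟩ := h
  have hcnat : c.toNat < limit.toNat := by omega
  have hpc : (st.2.getD c.toNat false = true) ↔ c.toNat.Prime := by
    rw [hboard c.toNat hcnat]; exact pvNotMarked_iff_prime c hc
  have hmsucc : ∀ i : ℕ, pvMarked (c+1) i ↔
      pvMarked c i ∨ (c.toNat.Prime ∧ c.toNat ∣ i ∧ c.toNat * c.toNat ≤ i) := by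
    intro i
    constructor
    · rintro ⟨q, hq, hqc, hqd, hqq⟩
      by_cases hqe : q = c.toNat
      · subst hqe; exact Or.inr ⟨hq, hqd, hqq⟩
      · exact Or.inl ⟨q, hq, by omega, hqd, hqq⟩
    · rintro (⟨q, hq, hqc, hqd, hqq⟩ | ⟨hp, hd, hqq⟩)
      · exact ⟨q, hq, by omega, hqd, hqq⟩
      · exact ⟨c.toNat, hp, by omega, hd, hqq⟩
  have hcast : ∀ i : ℕ, (c ∣ (i : Int) ∧ c * c ≤ (i : Int)) ↔
      (c.toNat ∣ i ∧ c.toNat * c.toNat ≤ i) := by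
    intro i
    have hcn : c = (c.toNat : Int) := by omega
    rw [hcn]
    constructor
    · rintro ⟨h1, h2⟩; exact ⟨by exact_mod_cast h1, by exact_mod_cast h2⟩
    · rintro ⟨h1, h2⟩; exact ⟨by exact_mod_cast h1, by exact_mod_cast h2⟩
  unfold pvSieveStep
  by_cases hb : st.2.getD c.toNat false = true
  · have hprime : c.toNat.Prime := hpc.mp hb
    rw [if_pos hb]
    refine ⟨by unfold pvMark; rw [pvFoldSetD_size]; exact hlen, ?_, ?_⟩
    · intro i hi
      rw [pvMark_getD limit c st.2 i hc hlen hi, hmsucc i]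
      by_cases hcnd : c ∣ (i : Int) ∧ c * c ≤ (i : Int)
      · rw [if_pos hcnd]
        have := (hcast i).mp hcnd
        constructor
        · intro hf; cases hf
        · intro hn; exact absurd (Or.inr ⟨hprime, this⟩) hn
      · rw [if_neg hcnd, hboard i hi]
        have hnc : ¬ (c.toNat ∣ i ∧ c.toNat * c.toNat ≤ i) := fun hx => hcnd ((hcast i).mpr hx)
        constructor
        · intro hnm hor; rcases hor with hm | hm
          · exact hnm hm
          · exact hnc ⟨hm.2.1, hm.2.2⟩
        · intro hn hm; exact hn (Or.inl hm)
    · have hpvc : pv_is_prime c = true := (pv_is_prime_iff c).mpr ⟨hc, hprime⟩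
      rw [Array.toList_push, PySem.List.pyRange_one_succ_right (by omega : (2:Int) ≤ c),
        List.filter_append, ← hacc]
      simp [hpvc]
  · have hnprime : ¬ c.toNat.Prime := fun hp => hb (hpc.mpr hp)
    rw [if_neg hb]
    refine ⟨hlen, ?_, ?_⟩
    · intro i hi
      rw [hboard i hi, hmsucc i]
      constructor
      · intro hnm hor; rcases hor with hm | hm
        · exact hnm hm
        · exact hnprime hm.1
      · intro hn hm; exact hn (Or.inl hm)
    · have hpvc : pv_is_prime c = false := by
        cases hx : pv_is_prime c
        · rfl
        · exact absurd ((pv_is_prime_iff c).mp hx).2 hnprime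
      rw [PySem.List.pyRange_one_succ_right (by omega : (2:Int) ≤ c), List.filter_append, ← hacc]
      simp [hpvc]

theorem pvLoop_inv (limit : Int) : ∀ (n : ℕ) (c : Int) (st : Array Int × Array Bool),
    (limit - c).toNat = n → 2 ≤ c → c ≤ limit → pvInv limit c st →
    pvInv limit limit ((PySem.List.pyRange c limit).foldl (pvSieveStep limit) st) := by
  intro n
  induction n with
  | zero =>
    intro c st h0 h2 hle hinv
    have hcl : c = limit := by omega
    subst hcl
    rw [PySem.List.pyRange_one_eq_nil le_rfl]
    exact hinv
  | succ m ih =>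
    intro c st h0 h2 hle hinv
    have hlt : c < limit := by omega
    rw [PySem.List.pyRange_one_cons hlt, List.foldl_cons]
    exact ih (c+1) _ (by omega) (by omega) (by omega) (pvStep_inv limit c st h2 hlt hinv)

-- the sieve produces exactly the pv_is_prime-filtered range [2, s]
theorem pvSieve_eq (s : Int) :
    get_all_prime_numbers_until s true =
      (PySem.List.pyRange 2 (s + 1)).filter (fun p => pv_is_prime p) := by
  show ((PySem.List.pyRange 2 (s+1)).foldl (pvSieveStep (s+1)) (#[], Array.replicate (s+1).toNat true)).1.toList = _
  by_cases h2 : s + 1 ≤ 2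
  · rw [PySem.List.pyRange_one_eq_nil h2]; rfl
  · push_neg at h2
    have hinv : pvInv (s+1) 2 (#[], Array.replicate (s+1).toNat true) := by
      refine ⟨by simp, ?_, by rw [PySem.List.pyRange_one_eq_nil le_rfl]; rfl⟩
      intro i hi
      rw [Array.getD_eq_getD_getElem?, Array.getElem?_replicate, if_pos hi]
      simp only [Option.getD_some]
      constructor
      · rintro - ⟨q, hq, hqc, -, -⟩
        have := hq.two_le; omega
      · intro _; trivial
    exact (pvLoop_inv (s+1) (s+1-2).toNat 2 _ rfl le_rfl (by omega) hinv).2.2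

theorem pvFind?_congr {l : List Int} {p q : Int → Bool} (h : ∀ x ∈ l, p x = q x) :
    l.find? p = l.find? q := by
  induction l with
  | nil => rfl
  | cons a rest ih =>
    simp only [List.find?_cons]
    rw [h a (by simp)]
    cases q a <;> simp [ih fun x hx => h x (by simp [hx])]

theorem pvFind?_filter (l : List Int) (p q : Int → Bool) :
    (l.filter p).find? q = l.find? (fun a => p a && q a) := by
  induction l with
  | nil => rfl
  | cons a rest ih =>
    by_cases hp : p a <;> by_cases hq : q a <;>
      simp [List.filter_cons, List.find?_cons, hp, hq, ih]

theorem pvScanA_eq_find (s : Int) (primes : List Int) : ∀ (l : List Int),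
    l.Pairwise (· < ·) →
    pvScanA s primes l =
      (match l.find? (fun p => decide (p ≤ PySem.Int.floordiv s 2) && primes.contains (s - p)) with
        | some p => [p, s - p]
        | none => [0, 0]) := by
  intro l hl
  induction l with
  | nil => rfl
  | cons a rest ih =>
    rw [List.pairwise_cons] at hl
    obtain ⟨ha, hrest⟩ := hl
    by_cases h1 : a > PySem.Int.floordiv s 2
    · have hnone : List.find?
          (fun p => decide (p ≤ PySem.Int.floordiv s 2) && primes.contains (s - p)) (a :: rest) = none := by
        apply List.find?_eq_none.mpr
        intro x hx
        have hxa : a ≤ x := by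
          rcases List.mem_cons.mp hx with rfl | hx
          · exact le_rfl
          · exact le_of_lt (ha x hx)
        simp only [Bool.and_eq_true, decide_eq_true_eq, not_and]
        intro hxh
        exact absurd hxh (by omega)
      rw [pvScanA, if_pos h1, hnone]
    · by_cases h2 : primes.contains (s - a) = true
      · rw [pvScanA, if_neg h1, if_pos h2,
          List.find?_cons_of_pos (by simp only [Bool.and_eq_true, decide_eq_true_eq]; exact ⟨by omega, h2⟩)]
      · rw [pvScanA, if_neg h1, if_neg h2, ih hrest,
          List.find?_cons_of_neg (by
            simp only [Bool.and_eq_true, decide_eq_true_eq, not_and]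
            intro _ hc
            exact h2 hc)]

theorem pvScanB_eq_find (s : Int) : ∀ (l : List Int),
    pvScanB s l =
      (match l.find? (fun i => pv_is_prime i && pv_is_prime (s - i)) with
        | some i => [i, s - i]
        | none => [0, 0]) := by
  intro l
  induction l with
  | nil => rfl
  | cons a rest ih =>
    by_cases h : (pv_is_prime a && pv_is_prime (s - a)) = true <;>
      simp [pvScanB, List.find?_cons, h, ih]

theorem pvMain (s : Int) :
    determine_prime_numbers_for_sum s = determine_prime_numbers_for_sum_alt s := by
  unfold determine_prime_numbers_for_sum determine_prime_numbers_for_sum_alt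
  rw [pvSieve_eq]
  set primes := (PySem.List.pyRange 2 (s+1)).filter (fun p => pv_is_prime p) with hprimes
  have hpair : primes.Pairwise (· < ·) := (PySem.List.pairwise_lt_pyRange_one 2 (s+1)).filter _
  rw [pvScanA_eq_find s primes primes hpair, pvScanB_eq_find]
  have hh2 : PySem.Int.floordiv s 2 = s / 2 := PySem.Int.floordiv_eq_ediv_of_pos (by norm_num)
  set h := PySem.Int.floordiv s 2 with hh
  clear_value h
  clear hh
  have hcontains : ∀ x : Int, (primes.contains x = true) ↔ (pv_is_prime x = true ∧ x ≤ s) := by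
    intro x
    rw [List.contains_iff_mem, hprimes, List.mem_filter, PySem.List.mem_pyRange_one]
    constructor
    · rintro ⟨⟨-, hlt⟩, hp⟩; exact ⟨hp, by omega⟩
    · rintro ⟨hp, hle⟩
      have := (pv_is_prime_iff x).mp hp
      exact ⟨⟨by omega, by omega⟩, hp⟩
  set P : Int → Bool := fun p => decide (p ≤ h) && primes.contains (s - p) with hP
  suffices hfind : primes.find? P =
      (PySem.List.pyRange 2 (h+1)).find? (fun i => pv_is_prime i && pv_is_prime (s - i)) by
    rw [hfind]
  have hfilt : primes.find? P =
      (PySem.List.pyRange 2 (s+1)).find? (fun a => pv_is_prime a && P a) := by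
    rw [hprimes]; exact pvFind?_filter _ _ _
  rw [hfilt]
  by_cases hs : s < 2
  · rw [PySem.List.pyRange_one_eq_nil (by omega : s + 1 ≤ 2),
      PySem.List.pyRange_one_eq_nil (by omega : h + 1 ≤ 2)]
    rfl
  · push_neg at hs
    have hh1 : 1 ≤ h := by omega
    have hhs : h ≤ s := by omega
    rw [PySem.List.pyRange_one_append 2 (h+1) (s+1) (by omega) (by omega), List.find?_append]
    have hsec : (PySem.List.pyRange (h+1) (s+1)).find? (fun a => pv_is_prime a && P a) = none := by
      apply List.find?_eq_none.mpr
      intro x hx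
      have hxm := (PySem.List.mem_pyRange_one).mp hx
      simp only [hP, Bool.and_eq_true, decide_eq_true_eq, not_and]
      intro _ hxh
      exact absurd hxh (by omega)
    rw [hsec, Option.or_none]
    apply pvFind?_congr
    intro x hx
    have hxm := (PySem.List.mem_pyRange_one).mp hx
    have hiff : (primes.contains (s - x) = true) ↔ (pv_is_prime (s - x) = true) := by
      rw [hcontains]
      exact ⟨fun hp => hp.1, fun hp => ⟨hp, by omega⟩⟩
    simp only [hP]
    rw [show primes.contains (s - x) = pv_is_prime (s - x) from Bool.eq_iff_iff.mpr hiff,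
      show decide (x ≤ h) = true from by simp only [decide_eq_true_eq]; omega, Bool.true_and]

-- ===== VERDICT (by name: the statement is the Claim_ definition above) =====
theorem determine_prime_numbers_for_sum_spec : Claim_equal_determine_prime_numbers_for_sum := by
  intro s _
  unfold Spec_determine_prime_numbers_for_sum
  exact pvMain s
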